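-- pv_equiv track=rewrite | github.com/Sahil01010011/webx | core/encoders.py | xml_encode
-- ===== SOURCE A (Python) =====
-- def xml_encode(payload: str) -> str:
--     """XML entity encoding for XXE and XML injection templates"""
--     xml_entities = {
--         '&': '&amp;',
--         '<': '&lt;',
--         '>': '&gt;',
--         '"': '&quot;',
--         "'": '&#x27;',
--         '/': '&#x2F;'
--     }
--
--     result = payload
--     for char, entity in xml_entities.items():
--         result = result.replace(char, entity)
--
--     return result
-- ===== SOURCE B (Python) =====
-- def xml_encode(payload: str) -> str:
--     """XML entity encoding for XXE and XML injection templates"""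
--     mapping = {
--         '&': '&amp;',
--         '<': '&lt;',
--         '>': '&gt;',
--         '"': '&quot;',
--         "'": '&#x27;',
--         '/': '&#x2F;'
--     }
--     return ''.join(mapping.get(ch, ch) for ch in payload)
-- ===== Notes on version B (the rewrite author's own statement) =====
-- stated objective: idiomatic
-- what changed: Replaced A's six sequential full-string .replace scans (each rebuilding the whole string) with a single character-by-character pass that maps each char through one entity dict and joins the pieces.
import Mathlib
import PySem

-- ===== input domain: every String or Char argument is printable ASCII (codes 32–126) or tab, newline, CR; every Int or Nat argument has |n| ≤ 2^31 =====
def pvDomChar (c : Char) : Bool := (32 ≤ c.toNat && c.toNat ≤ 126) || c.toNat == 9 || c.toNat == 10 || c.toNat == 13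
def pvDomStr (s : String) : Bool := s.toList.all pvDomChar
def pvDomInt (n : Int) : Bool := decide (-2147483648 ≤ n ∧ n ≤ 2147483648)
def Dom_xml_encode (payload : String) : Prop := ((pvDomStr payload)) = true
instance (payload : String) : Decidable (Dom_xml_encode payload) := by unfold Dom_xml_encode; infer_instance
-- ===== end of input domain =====

-- B replaces A's six sequential full-string .replace scans with one per-character
-- mapping pass (idiomatic single pass); return values are proved equal.

-- ===== PORT A =====
-- A applies six str.replace calls in dict insertion order ('&' first).
def xml_encode (payload : String) : String :=
  let result := payload
  let result := PySem.Str.replace result "&" "&amp;"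
  let result := PySem.Str.replace result "<" "&lt;"
  let result := PySem.Str.replace result ">" "&gt;"
  let result := PySem.Str.replace result "\"" "&quot;"
  let result := PySem.Str.replace result "'" "&#x27;"
  let result := PySem.Str.replace result "/" "&#x2F;"
  result

-- ===== PORT B =====
-- mapping.get(ch, ch) of Source B
def encChar (c : Char) : List Char :=
  if c = '&' then "&amp;".toList
  else if c = '<' then "&lt;".toList
  else if c = '>' then "&gt;".toList
  else if c = '"' then "&quot;".toList
  else if c = '\'' then "&#x27;".toList
  else if c = '/' then "&#x2F;".toList
  else [c]

-- ''.join(mapping.get(ch, ch) for ch in payload)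
def xml_encode_alt (payload : String) : String :=
  String.ofList (payload.toList.flatMap encChar)

-- ===== PRECONDITION & SPEC =====
def Spec_xml_encode (payload : String) (out : String) : Prop := out = xml_encode_alt payload
instance (payload : String) (out : String) : Decidable (Spec_xml_encode payload out) := by unfold Spec_xml_encode; infer_instance

-- ===== CLAIM (what is proved, stated in full; the proofs are below) =====
def Claim_equal_xml_encode : Prop := ∀ (payload : String), Dom_xml_encode payload → Spec_xml_encode payload (xml_encode payload)

-- ===== LEMMAS AND PROOFS =====

-- single-character str.replace acts independently on each character
theorem go_single (a : Char) (new : List Char) :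
    ∀ (l : List Char) (fuel : Nat) (acc : List Char), l.length ≤ fuel →
      PySem.Chars.replace.go [a] new fuel l acc
        = acc.reverse ++ l.flatMap (fun c => if c = a then new else [c]) := by
  intro l
  induction l with
  | nil => intro fuel acc h; cases fuel <;> simp [PySem.Chars.replace.go]
  | cons c t ih =>
    intro fuel acc h
    cases fuel with
    | zero => simp at h
    | succ n =>
      simp only [PySem.Chars.replace.go]
      by_cases hc : c = a
      · subst hc
        rw [show ([c]:List Char).isPrefixOf (c :: t) = true by simp [List.isPrefixOf]]
        simp only [List.length_singleton, List.drop_succ_cons, List.drop_zero]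
        rw [ih _ _ (by simp at h; omega)]
        simp
      · rw [show ([a]:List Char).isPrefixOf (c :: t) = false by
            simp [List.isPrefixOf]; exact fun h => (hc h.symm)]
        simp only [Bool.false_eq_true, if_false]
        rw [ih _ _ (by simp at h; omega)]
        simp [hc]

theorem replace_single (l : List Char) (a : Char) (new : List Char) :
    PySem.Chars.replace l [a] new = l.flatMap (fun c => if c = a then new else [c]) := by
  simp [PySem.Chars.replace, go_single a new l l.length [] le_rfl]

-- composing the six per-character substitutions gives exactly encChar
theorem comp_eq_encChar (c : Char) :
    ((((((if c = '&' then "&amp;".toList else [c]).flatMap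
        (fun c => if c = '<' then "&lt;".toList else [c])).flatMap
        (fun c => if c = '>' then "&gt;".toList else [c])).flatMap
        (fun c => if c = '"' then "&quot;".toList else [c])).flatMap
        (fun c => if c = '\'' then "&#x27;".toList else [c])).flatMap
        (fun c => if c = '/' then "&#x2F;".toList else [c]))
      = encChar c := by
  by_cases h1 : c = '&'; · subst h1; decide
  by_cases h2 : c = '<'; · subst h2; decide
  by_cases h3 : c = '>'; · subst h3; decide
  by_cases h4 : c = '"'; · subst h4; decide
  by_cases h5 : c = '\''; · subst h5; decide
  by_cases h6 : c = '/'; · subst h6; decide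
  simp [encChar, h1, h2, h3, h4, h5, h6]

-- ===== VERDICT (by name: the statement is the Claim_ definition above) =====
theorem xml_encode_spec : Claim_equal_xml_encode := by
  intro payload _
  unfold Spec_xml_encode xml_encode xml_encode_alt
  simp only [PySem.Str.replace]
  simp only [show ("&".toList) = ['&'] from rfl, show ("<".toList) = ['<'] from rfl,
    show (">".toList) = ['>'] from rfl, show ("\"".toList) = ['"'] from rfl,
    show ("'".toList) = ['\''] from rfl, show ("/".toList) = ['/'] from rfl,
    String.toList_ofList, replace_single, List.flatMap_assoc]
  congr 1
  apply List.flatMap_congr  -- pointwise via comp_eq_encChar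
  intro c _
  simpa [List.flatMap_assoc] using comp_eq_encChar c
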